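-- pv_equiv track=rewrite | github.com/anang0g0/McEliece-R_T | sakai_p_cycle.py | create_from_dcycle
-- ===== SOURCE A (Python) =====
-- def create_from_dcycle(d_cycles):
--     tbl = {}
--     for i, p in enumerate(d_cycles):
--         tbl.setdefault(p, []).append(i)
--
--     lst = [-1] * len(d_cycles)
--     for p, idx_list in tbl.items():
--         idx_list2 = list(idx_list) + [idx_list[0]]
--         for i, idx in enumerate(idx_list):
--             lst[idx] = idx_list2[i + 1]
--     return lst
-- ===== SOURCE B (Python) =====
-- def create_from_dcycle(d_cycles):
--     n = len(d_cycles)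
--
--     def nxt(i):
--         for j in range(i + 1, n):
--             if d_cycles[j] == d_cycles[i]:
--                 return j
--         for j in range(i + 1):
--             if d_cycles[j] == d_cycles[i]:
--                 return j
--         return -1  # unreachable: j == i always matches
--
--     return [nxt(i) for i in range(n)]
-- ===== Notes on version B (the rewrite author's own statement) =====
-- stated objective: simpler
-- what changed: Replaces the group-by-value dict and the two-phase cyclic rewiring with a direct pointwise rule: each position's successor is the next later index holding the same value, wrapping around to the first such index.
import Mathlib
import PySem

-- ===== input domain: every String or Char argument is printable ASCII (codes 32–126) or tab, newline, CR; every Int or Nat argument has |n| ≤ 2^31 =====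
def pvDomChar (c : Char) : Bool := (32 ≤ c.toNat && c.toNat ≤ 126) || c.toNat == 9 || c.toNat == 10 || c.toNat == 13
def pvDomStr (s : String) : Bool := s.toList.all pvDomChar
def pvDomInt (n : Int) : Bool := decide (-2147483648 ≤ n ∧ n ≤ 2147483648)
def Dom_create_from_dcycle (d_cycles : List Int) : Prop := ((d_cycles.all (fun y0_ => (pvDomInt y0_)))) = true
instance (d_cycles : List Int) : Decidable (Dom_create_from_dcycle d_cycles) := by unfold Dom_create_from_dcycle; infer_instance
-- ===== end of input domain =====

-- ===== PORT A =====
-- Header: B computes the same cyclic next-equal-index permutation pointwise (next later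
-- index with the same value, wrapping to the first), instead of A's group-by-value dict
-- and two-phase rewiring; objective: simpler.
def create_from_dcycle (d_cycles : List Int) : List Int :=
  let tbl : PySem.Dict Int (List Int) :=
    (PySem.List.enumerate d_cycles).foldl
      (fun t ip => t.modify ip.2 [] (fun cur => cur ++ [ip.1])) PySem.Dict.empty
  let lst : List Int := List.replicate d_cycles.length (-1)
  tbl.items.foldl
    (fun lst pg =>
      match PySem.List.pyGet? pg.2 0 with
      | none => lst   -- idx_list[0] would raise IndexError; unreachable (groups are nonempty)
      | some g0 =>
        let idx_list2 := pg.2 ++ [g0]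
        (PySem.List.enumerate pg.2).foldl
          (fun lst ii => PySem.List.pySetD lst ii.2 (PySem.List.pyGetD idx_list2 (ii.1 + 1) (-1)))
          lst)
    lst

-- ===== PORT B =====
def pvNxt (d : List Int) (i : Int) : Int :=
  match (PySem.List.pyRange (i + 1) d.length 1).find?
      (fun j => PySem.List.pyGetD d j 0 == PySem.List.pyGetD d i 0) with
  | some j => j
  | none =>
    match (PySem.List.pyRange 0 (i + 1) 1).find?
        (fun j => PySem.List.pyGetD d j 0 == PySem.List.pyGetD d i 0) with
    | some j => j
    | none => -1   -- unreachable: j = i always matches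

def create_from_dcycle_alt (d_cycles : List Int) : List Int :=
  (PySem.List.pyRange 0 d_cycles.length 1).map (fun i => pvNxt d_cycles i)

-- ===== PRECONDITION & SPEC =====
def Spec_create_from_dcycle (d_cycles : List Int) (out : List Int) : Prop := out = create_from_dcycle_alt d_cycles
instance (d_cycles : List Int) (out : List Int) : Decidable (Spec_create_from_dcycle d_cycles out) := by unfold Spec_create_from_dcycle; infer_instance

-- ===== CLAIM (what is proved, stated in full; the proofs are below) =====
def Claim_equal_create_from_dcycle : Prop := ∀ (d_cycles : List Int), Dom_create_from_dcycle d_cycles → Spec_create_from_dcycle d_cycles (create_from_dcycle d_cycles)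

-- ===== LEMMAS AND PROOFS =====

-- the list of indices (in increasing order) at which `d` holds the value `p`
def pvGrp (d : List Int) (p : Int) : List Int :=
  ((PySem.List.enumerate d).filter (fun ip => ip.2 == p)).map (·.1)

-- the value A's write phase stores at position j: the cyclic successor of j in its group
def pvWriteVal (d : List Int) (j : Nat) : Int :=
  PySem.List.pyGetD
    (pvGrp d (d.getD j 0) ++ [(pvGrp d (d.getD j 0)).headD 0])
    (((pvGrp d (d.getD j 0)).idxOf (j : Int) : Int) + 1) (-1)

lemma pv_find?_eq_head?_filter (l : List Int) (q : Int → Bool) :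
    l.find? q = (l.filter q).head? := by
  induction l with
  | nil => rfl
  | cons x t ih =>
    by_cases h : q x = true
    · simp [h]
    · simp only [Bool.not_eq_true] at h
      rw [List.find?_cons_of_neg (by simp [h]), List.filter_cons_of_neg (by simp [h]), ih]

lemma pv_mem_grp (d : List Int) (p x : Int) :
    x ∈ pvGrp d p ↔ ∃ k : Nat, k < d.length ∧ x = (k : Int) ∧ d[k]? = some p := by
  unfold pvGrp
  simp only [List.mem_map, List.mem_filter, PySem.List.mem_enumerate_iff]
  constructor
  · rintro ⟨⟨i, v⟩, ⟨⟨k, hk, hkv⟩, hp⟩, hx⟩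
    cases hkv
    refine ⟨k, hk, ?_, ?_⟩
    · simpa using hx.symm
    · simp only [beq_iff_eq] at hp
      simp [List.getElem?_eq_getElem hk, hp]
  · rintro ⟨k, hk, hx, hget⟩
    refine ⟨((k : Int), d[k]), ⟨⟨k, hk, by simp⟩, ?_⟩, by simpa using hx.symm⟩
    simp only [beq_iff_eq]
    rw [List.getElem?_eq_getElem hk] at hget
    exact Option.some_injective _ hget

lemma pv_grp_pairwise (d : List Int) (p : Int) :
    (pvGrp d p).Pairwise (· < ·) := by
  unfold pvGrp
  exact ((PySem.List.pairwise_lt_enumerate d 0).filter _).map _ (fun a b h => h)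

lemma pv_grp_nodup (d : List Int) (p : Int) : (pvGrp d p).Nodup :=
  (pv_grp_pairwise d p).imp (fun h => ne_of_lt h)

-- the grouping dict built by A's first loop, characterized
lemma pv_tbl_items (d : List Int) :
    ((PySem.List.enumerate d).foldl
      (fun t ip => t.modify ip.2 [] (fun cur => cur ++ [ip.1]))
      (PySem.Dict.empty : PySem.Dict Int (List Int))).items
    = (PySem.Set.ofList d).map (fun p => (p, pvGrp d p)) := by
  have hk : ((PySem.List.enumerate d).foldl
      (fun t ip => t.modify ip.2 [] (fun cur => cur ++ [ip.1]))
      (PySem.Dict.empty : PySem.Dict Int (List Int))).keys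
      = PySem.Set.ofList d := by
    have h := PySem.Dict.keys_foldl_modify_key (PySem.List.enumerate d)
      (fun ip => ip.2) ([] : List Int) (fun _ ip => fun cur => cur ++ [ip.1]) PySem.Dict.empty
    simp only [] at h
    rw [h]
    simp [PySem.List.map_snd_enumerate, PySem.Set.update, PySem.Set.ofList_eq_foldl]
  have hnd : ((PySem.List.enumerate d).foldl
      (fun t ip => t.modify ip.2 [] (fun cur => cur ++ [ip.1]))
      (PySem.Dict.empty : PySem.Dict Int (List Int))).keys.Nodup := by
    rw [hk]; exact PySem.Set.nodup_ofList d
  rw [PySem.Dict.items_eq_map_keys _ hnd ([] : List Int), hk]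
  refine List.map_congr_left (fun p hp => ?_)
  congr 1
  have hfold : ((PySem.List.enumerate d).foldl
      (fun t ip => t.modify ip.2 [] (fun cur => cur ++ [ip.1]))
      (PySem.Dict.empty : PySem.Dict Int (List Int)))
      = (((PySem.List.enumerate d).map (fun ip => (ip.2, ip.1))).foldl
      (fun t q => t.modify q.1 [] (fun cur => cur ++ [q.2]))
      (PySem.Dict.empty : PySem.Dict Int (List Int))) := by
    rw [List.foldl_map]
  rw [hfold, PySem.Dict.getD_foldl_modify_append]
  unfold pvGrp
  simp [List.filter_map, List.map_map, Function.comp_def]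

-- one group's inner write loop, pointwise
lemma pv_inner_len (g2 : List Int) (l : List Int) (s : Int) (lst : List Int) :
    ((PySem.List.enumerate l s).foldl
      (fun acc ii => PySem.List.pySetD acc ii.2 (PySem.List.pyGetD g2 (ii.1 + 1) (-1)))
      lst).length = lst.length := by
  induction l generalizing s lst with
  | nil => rfl
  | cons x t ih =>
    rw [PySem.List.enumerate_cons, List.foldl_cons, ih]
    exact PySem.List.length_pySetD ..

lemma pv_inner (g2 : List Int) (l : List Int) (s : Nat) (lst : List Int)
    (hnd : l.Nodup)
    (hin : ∀ x ∈ l, ∃ k : Nat, k < lst.length ∧ x = (k : Int)) :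
    ∀ j : Nat, j < lst.length →
      ((PySem.List.enumerate l (s : Int)).foldl
        (fun acc ii => PySem.List.pySetD acc ii.2 (PySem.List.pyGetD g2 (ii.1 + 1) (-1)))
        lst)[j]? =
      if (j : Int) ∈ l then
        some (PySem.List.pyGetD g2 ((s : Int) + (l.idxOf (j : Int) : Int) + 1) (-1))
      else lst[j]? := by
  induction l generalizing s lst with
  | nil => intro j hj; simp [PySem.List.enumerate_nil]
  | cons x t ih =>
    intro j hj
    obtain ⟨hxt, hndt⟩ := List.nodup_cons.mp hnd
    obtain ⟨k, hk, hxk⟩ := hin x List.mem_cons_self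
    have hs1 : (s : Int) + 1 = ((s + 1 : Nat) : Int) := by push_cast; ring
    have hset : PySem.List.pySetD lst x (PySem.List.pyGetD g2 (((s + 1 : Nat) : Int)) (-1))
        = lst.set k (PySem.List.pyGetD g2 (((s + 1 : Nat) : Int)) (-1)) := by
      rw [hxk]; exact PySem.List.pySetD_natCast ..
    rw [PySem.List.enumerate_cons, List.foldl_cons, hs1, hset]
    have hlen : (lst.set k (PySem.List.pyGetD g2 (((s + 1 : Nat) : Int)) (-1))).length
        = lst.length := by simp
    have hin' : ∀ y ∈ t, ∃ k' : Nat,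
        k' < (lst.set k (PySem.List.pyGetD g2 (((s + 1 : Nat) : Int)) (-1))).length ∧
        y = (k' : Int) := by
      intro y hy
      obtain ⟨k', hk', h'⟩ := hin y (List.mem_cons_of_mem _ hy)
      exact ⟨k', by simpa [hlen] using hk', h'⟩
    rw [ih (s + 1) _ hndt hin' j (by simpa [hlen] using hj)]
    by_cases hjt : (j : Int) ∈ t
    · have hjx : (j : Int) ≠ x := fun h => hxt (h ▸ hjt)
      rw [if_pos hjt, if_pos (List.mem_cons_of_mem _ hjt)]
      rw [List.idxOf_cons_ne _ (fun h => hjx h.symm)]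
      congr 2
      push_cast
      ring
    · rw [if_neg hjt]
      by_cases hjx : (j : Int) = x
      · have hjk : j = k := by exact_mod_cast hjx.trans hxk
        rw [if_pos (by simp [hjx]), hjk, List.getElem?_set_self (by omega)]
        rw [show List.idxOf ((k : Int)) (x :: t) = 0 by
          rw [hxk]; exact List.idxOf_cons_self]
        norm_num
      · rw [if_neg (by simp [hjx, hjt]), List.getElem?_set_ne]
        omega

-- A's whole write phase over a list of values, pointwise
def pvStep (lst : List Int) (pg : Int × List Int) : List Int :=
  match PySem.List.pyGet? pg.2 0 with
  | none => lst
  | some g0 =>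
    let idx_list2 := pg.2 ++ [g0]
    (PySem.List.enumerate pg.2).foldl
      (fun lst ii => PySem.List.pySetD lst ii.2
        (PySem.List.pyGetD idx_list2 (ii.1 + 1) (-1))) lst

lemma pv_A_eq_fold (d : List Int) :
    create_from_dcycle d =
      ((PySem.Set.ofList d).map (fun p => (p, pvGrp d p))).foldl pvStep
        (List.replicate d.length (-1)) := by
  have h1 : create_from_dcycle d =
      ((PySem.List.enumerate d).foldl
        (fun t ip => t.modify ip.2 [] (fun cur => cur ++ [ip.1]))
        (PySem.Dict.empty : PySem.Dict Int (List Int))).items.foldl pvStep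
        (List.replicate d.length (-1)) := rfl
  rw [h1, pv_tbl_items]

lemma pv_step_len (lst : List Int) (pg : Int × List Int) :
    (pvStep lst pg).length = lst.length := by
  unfold pvStep
  cases h : PySem.List.pyGet? pg.2 0 with
  | none => rfl
  | some g0 => exact pv_inner_len ..

lemma pv_outer_len (d : List Int) (P : List Int) (lst : List Int) :
    ((P.map (fun p => (p, pvGrp d p))).foldl pvStep lst).length = lst.length := by
  induction P generalizing lst with
  | nil => rfl
  | cons p t ih => rw [List.map_cons, List.foldl_cons, ih, pv_step_len]

lemma pv_grp_in_range (d : List Int) (p : Int) (lst : List Int)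
    (hlen : lst.length = d.length) :
    ∀ x ∈ pvGrp d p, ∃ k : Nat, k < lst.length ∧ x = (k : Int) := by
  intro x hx
  obtain ⟨k, hk, hxk, _⟩ := (pv_mem_grp d p x).mp hx
  exact ⟨k, by omega, hxk⟩

lemma pv_j_mem_grp (d : List Int) (j : Nat) (hj : j < d.length) (p : Int)
    (hp : d[j] = p) : (j : Int) ∈ pvGrp d p := by
  exact (pv_mem_grp d p (j : Int)).mpr ⟨j, hj, rfl, by rw [List.getElem?_eq_getElem hj, hp]⟩

lemma pv_j_not_mem_grp (d : List Int) (j : Nat) (hj : j < d.length) (p : Int)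
    (hp : d[j] ≠ p) : (j : Int) ∉ pvGrp d p := by
  intro hmem
  obtain ⟨k, hk, hjk, hget⟩ := (pv_mem_grp d p _).mp hmem
  have hkj : k = j := by exact_mod_cast hjk.symm
  subst hkj
  rw [List.getElem?_eq_getElem hk] at hget
  exact hp (Option.some_injective _ hget)

lemma pv_step_at (d : List Int) (p : Int) (lst : List Int)
    (hlen : lst.length = d.length) (j : Nat) (hj : j < d.length) :
    (pvStep lst (p, pvGrp d p))[j]? =
      if d[j] = p then some (pvWriteVal d j) else lst[j]? := by
  unfold pvStep
  cases hg : PySem.List.pyGet? (pvGrp d p) 0 with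
  | none =>
    have hge : pvGrp d p = [] := by
      cases hge : pvGrp d p with
      | nil => rfl
      | cons a r =>
        rw [hge, show (0 : Int) = ((0 : Nat) : Int) from rfl,
          PySem.List.pyGet?_natCast] at hg
        simp at hg
    simp only []
    rw [if_neg (fun hp => by
      have := pv_j_mem_grp d j hj p hp
      rw [hge] at this
      exact (List.not_mem_nil).elim this)]
  | some g0 =>
    have hg0 : g0 = (pvGrp d p).headD 0 := by
      cases hge : pvGrp d p with
      | nil =>
        rw [hge] at hg
        simp [PySem.List.pyGet?] at hg
      | cons a r =>
        rw [hge, show (0 : Int) = ((0 : Nat) : Int) from rfl,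
          PySem.List.pyGet?_natCast] at hg
        simp at hg
        simp [hg]
    simp only []
    have hinner := pv_inner (pvGrp d p ++ [g0]) (pvGrp d p) 0 lst
      (pv_grp_nodup d p) (pv_grp_in_range d p lst hlen) j (by omega)
    simp only [Nat.cast_zero] at hinner
    rw [hinner]
    by_cases hdj : d[j] = p
    · rw [if_pos (pv_j_mem_grp d j hj p hdj), if_pos hdj]
      unfold pvWriteVal
      have hgd : d.getD j 0 = p := by
        rw [List.getD_eq_getElem?_getD, List.getElem?_eq_getElem hj]
        simpa using hdj
      rw [hgd, hg0]
      norm_num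
    · rw [if_neg (pv_j_not_mem_grp d j hj p hdj), if_neg hdj]

lemma pv_outer (d : List Int) (P : List Int) (lst : List Int)
    (hlen : lst.length = d.length) :
    ∀ (j : Nat) (_ : j < d.length),
      ((P.map (fun p => (p, pvGrp d p))).foldl pvStep lst)[j]? =
      if d[j] ∈ P then some (pvWriteVal d j) else lst[j]? := by
  induction P generalizing lst with
  | nil => intro j hj; simp
  | cons p t ih =>
    intro j hj
    rw [List.map_cons, List.foldl_cons,
      ih (pvStep lst (p, pvGrp d p)) ((pv_step_len ..).trans hlen) j hj,
      pv_step_at d p lst hlen j hj]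
    by_cases hmem : d[j] ∈ t
    · rw [if_pos hmem, if_pos (List.mem_cons_of_mem _ hmem)]
    · rw [if_neg hmem]
      by_cases hdj : d[j] = p
      · rw [if_pos hdj, if_pos (by simp [hdj])]
      · rw [if_neg hdj, if_neg (by simp [hdj, hmem])]

-- A, characterized pointwise
lemma pv_A_len (d : List Int) : (create_from_dcycle d).length = d.length := by
  rw [pv_A_eq_fold, pv_outer_len, List.length_replicate]

lemma pv_A_get (d : List Int) (j : Nat) (hj : j < d.length) :
    (create_from_dcycle d)[j]? = some (pvWriteVal d j) := by
  rw [pv_A_eq_fold, pv_outer d _ _ (List.length_replicate) j hj,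
    if_pos (by rw [PySem.Set.mem_ofList]; exact List.getElem_mem hj)]

-- B, characterized pointwise
lemma pv_B_len (d : List Int) : (create_from_dcycle_alt d).length = d.length := by
  unfold create_from_dcycle_alt
  rw [List.length_map, PySem.List.length_pyRange_one]
  omega

lemma pv_B_get (d : List Int) (j : Nat) (hj : j < d.length) :
    (create_from_dcycle_alt d)[j]? = some (pvNxt d (j : Int)) := by
  unfold create_from_dcycle_alt
  rw [List.getElem?_map, PySem.List.getElem?_pyRange_one]
  rw [if_pos (by omega)]
  simp

-- the group as a filtered range, and its split at the focus index
lemma pv_grp_range (d : List Int) (p : Int) :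
    pvGrp d p = (PySem.List.pyRange 0 d.length 1).filter
      (fun k => PySem.List.pyGetD d k 0 == p) := by
  unfold pvGrp
  rw [PySem.List.enumerate_eq_map_pyRange d 0, List.filter_map, List.map_map]
  simp [Function.comp_def]

-- the heart of the equivalence: B's pointwise rule computes A's stored value
lemma pv_nxt_eq (d : List Int) (j : Nat) (hj : j < d.length) :
    pvNxt d (j : Int) = pvWriteVal d j := by
  have hgd : d.getD j 0 = d[j] := by
    rw [List.getD_eq_getElem?_getD, List.getElem?_eq_getElem hj]; rfl
  have hpy : PySem.List.pyGetD d (j : Int) 0 = d[j] := by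
    rw [PySem.List.pyGetD_natCast, hgd]
  set q : Int → Bool := fun k => PySem.List.pyGetD d k 0 == d[j] with hq
  clear hq
  -- split the group at j
  have hsplit : pvGrp d d[j] =
      ((PySem.List.pyRange 0 (j : Int) 1).filter q ++ [(j : Int)]) ++
      (PySem.List.pyRange ((j : Int) + 1) d.length 1).filter q := by
    rw [pv_grp_range,
      PySem.List.pyRange_one_append 0 ((j : Int) + 1) d.length (by omega) (by omega),
      List.filter_append,
      PySem.List.pyRange_one_succ_right (by omega : (0 : Int) ≤ (j : Int)),
      List.filter_append]
    congr 2
    simp [hpy]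
  set F0 := (PySem.List.pyRange 0 (j : Int) 1).filter q with hF0
  set F2 := (PySem.List.pyRange ((j : Int) + 1) d.length 1).filter q with hF2
  have hjF0 : (j : Int) ∉ F0 := by
    intro hmem
    have := (PySem.List.mem_pyRange_one ..).mp (List.mem_of_mem_filter hmem)
    omega
  clear_value F0 F2
  have hidx : (pvGrp d d[j]).idxOf (j : Int) = F0.length := by
    rw [hsplit, List.append_assoc, List.idxOf_append_of_notMem hjF0]
    simp
  unfold pvWriteVal pvNxt
  rw [hgd, hidx]
  have hfind1 : (PySem.List.pyRange ((j : Int) + 1) d.length 1).find?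
      (fun k => PySem.List.pyGetD d k 0 == PySem.List.pyGetD d (j : Int) 0) = F2.head? := by
    rw [hF2, ← pv_find?_eq_head?_filter]
    congr 1
    funext k
    rw [hpy]
  rw [hfind1]
  cases hF2e : F2 with
  | cons f2 r =>
    -- a later index with the same value exists: both sides return the first one
    have hlt : F0.length + 1 < (pvGrp d d[j]).length := by
      rw [hsplit, hF2e]
      simp
    have hcast : ((F0.length : Int) + 1) = ((F0.length + 1 : Nat) : Int) := by push_cast; ring
    conv_rhs => rw [hcast, PySem.List.pyGetD_natCast, List.getD_eq_getElem?_getD,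
      List.getElem?_append_left hlt, hsplit, hF2e, List.append_assoc,
      List.getElem?_append_right (by omega)]
    simp
  | nil =>
    -- j is the last index of its group: wrap around to the first one
    have hg_eq : pvGrp d d[j] = F0 ++ [(j : Int)] := by rw [hsplit, hF2e, List.append_nil]
    have hlen_g : (pvGrp d d[j]).length = F0.length + 1 := by rw [hg_eq]; simp
    have hcast : ((F0.length : Int) + 1) = ((F0.length + 1 : Nat) : Int) := by push_cast; ring
    conv_rhs => rw [hcast, PySem.List.pyGetD_natCast, List.getD_eq_getElem?_getD,
      List.getElem?_append_right (by omega), hlen_g]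
    have hfind2 : (PySem.List.pyRange 0 ((j : Int) + 1) 1).find?
        (fun k => PySem.List.pyGetD d k 0 == PySem.List.pyGetD d (j : Int) 0)
        = (pvGrp d d[j]).head? := by
      rw [pv_find?_eq_head?_filter]
      have heq : (PySem.List.pyRange 0 ((j : Int) + 1) 1).filter
          (fun k => PySem.List.pyGetD d k 0 == PySem.List.pyGetD d (j : Int) 0)
          = pvGrp d d[j] := by
        rw [hg_eq, hF0,
          PySem.List.pyRange_one_succ_right (by omega : (0 : Int) ≤ (j : Int)),
          List.filter_append]
        congr 1
        · apply List.filter_congr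
          intro k _
          rw [hpy]
        · simp [hpy]
      rw [heq]
    rw [hfind2, hg_eq]
    cases F0 with
    | nil => simp
    | cons a r => simp

lemma pv_final (d : List Int) : create_from_dcycle d = create_from_dcycle_alt d := by
  apply List.ext_getElem?
  intro j
  by_cases hj : j < d.length
  · rw [pv_A_get d j hj, pv_B_get d j hj, pv_nxt_eq d j hj]
  · rw [List.getElem?_eq_none (by rw [pv_A_len]; omega),
      List.getElem?_eq_none (by rw [pv_B_len]; omega)]

-- ===== VERDICT (by name: the statement is the Claim_ definition above) =====
theorem create_from_dcycle_spec : Claim_equal_create_from_dcycle := by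
  intro d _
  unfold Spec_create_from_dcycle
  exact pv_final d
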